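-- pv_equiv track=rewrite | github.com/quan-nguyen-2/CSCI-1133 | labs/lab7/min_max_num.py | min_max_nums
-- ===== SOURCE A (Python) =====
-- def min_max_nums(string):
--     lst = string.split()
--     element = 0
--     min = len(lst[0])
--     max = len(lst[0])
--     for i in lst:
--         (len(lst[element]))
--         element += 1
--         if min > len(i):
--             min = len(i)
--         if max < len(i):
--             max = len(i)
--     return [min,max]
-- ===== SOURCE B (Python) =====
-- def min_max_nums(string):
--     s = sorted(len(w) for w in string.split())
--     return [s[0], s[-1]]
-- ===== Notes on version B (the rewrite author's own statement) =====
-- stated objective: simpler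
-- what changed: Replaces the running min/max tracking loop (with its dead indexing expression and counter) by sorting the word lengths once and reading the two ends of the sorted list.
import Mathlib
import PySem

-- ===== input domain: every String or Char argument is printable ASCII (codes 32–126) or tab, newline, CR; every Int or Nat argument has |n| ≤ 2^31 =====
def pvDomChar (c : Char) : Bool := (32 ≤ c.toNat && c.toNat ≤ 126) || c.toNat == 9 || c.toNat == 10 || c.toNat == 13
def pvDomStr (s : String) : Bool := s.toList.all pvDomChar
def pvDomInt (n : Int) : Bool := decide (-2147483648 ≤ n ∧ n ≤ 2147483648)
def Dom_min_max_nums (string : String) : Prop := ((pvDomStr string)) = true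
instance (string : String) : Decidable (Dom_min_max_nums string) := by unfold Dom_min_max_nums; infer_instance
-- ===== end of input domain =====

-- B replaces A's running min/max loop by sorting the word lengths and reading the ends; proved equal where the string has at least one word.


-- ===== PORT A =====
-- literal port of A: split, take len(lst[0]) for min and max, then the loop
-- (the dead expression 'len(lst[element])' and the counter are kept as state).
def min_max_nums (string : String) : List Int :=
  let lst := PySem.Str.split₀ string
  match PySem.List.pyGet? lst 0 with
  | none => []          -- A raises IndexError here; excluded by Pre_
  | some w0 =>
    let mn : Int := PySem.Str.len w0
    let mx : Int := PySem.Str.len w0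
    let r := lst.foldl (fun (s : Int × Int × Int) i =>
      let element := s.1 + 1
      let mn := if s.2.1 > PySem.Str.len i then PySem.Str.len i else s.2.1
      let mx := if s.2.2 < PySem.Str.len i then PySem.Str.len i else s.2.2
      (element, mn, mx)) (0, mn, mx)
    [r.2.1, r.2.2]

-- ===== PORT B =====
def min_max_nums_alt (string : String) : List Int :=
  let s := PySem.List.sorted ((PySem.Str.split₀ string).map PySem.Str.len)
             (fun x => x) false
  match PySem.List.pyGet? s 0, PySem.List.pyGet? s (-1) with
  | some a, some b => [a, b]
  | _, _ => []        -- B raises IndexError here; excluded by Pre_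

-- ===== PRECONDITION & SPEC =====
-- Pre_ excludes strings with no words (empty / whitespace only), on which both A and B raise IndexError.
def Pre_min_max_nums (string : String) : Prop := PySem.Str.split₀ string ≠ []
instance (string : String) : Decidable (Pre_min_max_nums string) := by unfold Pre_min_max_nums; infer_instance
def pvWitness_min_max_nums : String := "hello world a"

def Spec_min_max_nums (string : String) (out : List Int) : Prop := out = min_max_nums_alt string
instance (string : String) (out : List Int) : Decidable (Spec_min_max_nums string out) := by unfold Spec_min_max_nums; infer_instance

-- ===== CLAIM (what is proved, stated in full; the proofs are below) =====
def Claim_equal_min_max_nums : Prop := ∀ (string : String), Dom_min_max_nums string → Pre_min_max_nums string → Spec_min_max_nums string (min_max_nums string)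

-- ===== LEMMAS AND PROOFS =====

-- A's fold, started at (e, m, M), computes running min and max of the lengths.
lemma foldA_min_max (L : List String) (e m M : Int) :
    (L.foldl (fun (s : Int × Int × Int) i =>
      let element := s.1 + 1
      let mn := if s.2.1 > PySem.Str.len i then PySem.Str.len i else s.2.1
      let mx := if s.2.2 < PySem.Str.len i then PySem.Str.len i else s.2.2
      (element, mn, mx)) (e, m, M)).2
    = ((L.map PySem.Str.len).foldl min m, (L.map PySem.Str.len).foldl max M) := by
  induction L generalizing e m M with
  | nil => rfl
  | cons x t ih =>
    simp only [List.foldl, List.map]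
    have h1 : (if m > PySem.Str.len x then PySem.Str.len x else m) = min m (PySem.Str.len x) := by
      rw [min_def]; split_ifs <;> omega
    have h2 : (if M < PySem.Str.len x then PySem.Str.len x else M) = max M (PySem.Str.len x) := by
      rw [max_def]; split_ifs <;> omega
    rw [h1, h2, ih]

lemma foldl_min_le (L : List Int) (a : Int) : ∀ y ∈ a :: L, L.foldl min a ≤ y := by
  induction L generalizing a with
  | nil => intro y hy; simp at hy; simp [hy]
  | cons x t ih =>
    intro y hy
    simp only [List.foldl]
    rcases List.mem_cons.mp hy with rfl | hy'
    · exact le_trans (ih (min y x) (min y x) (by simp)) (min_le_left y x)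
    · rcases List.mem_cons.mp hy' with rfl | h
      · exact le_trans (ih (min a y) (min a y) (by simp)) (min_le_right a y)
      · exact ih (min a x) y (by simp [h])

lemma foldl_min_mem (L : List Int) (a : Int) : L.foldl min a ∈ a :: L := by
  induction L generalizing a with
  | nil => simp
  | cons x t ih =>
    simp only [List.foldl]
    rcases List.mem_cons.mp (ih (min a x)) with h | h
    · rcases min_choice a x with hc | hc <;> rw [h, hc] <;> simp
    · simp [h]

lemma le_foldl_max (L : List Int) (a : Int) : ∀ y ∈ a :: L, y ≤ L.foldl max a := by
  induction L generalizing a with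
  | nil => intro y hy; simp at hy; simp [hy]
  | cons x t ih =>
    intro y hy
    simp only [List.foldl]
    rcases List.mem_cons.mp hy with rfl | hy'
    · exact le_trans (le_max_left y x) (ih (max y x) (max y x) (by simp))
    · rcases List.mem_cons.mp hy' with rfl | h
      · exact le_trans (le_max_right a y) (ih (max a y) (max a y) (by simp))
      · exact ih (max a x) y (by simp [h])

lemma foldl_max_mem (L : List Int) (a : Int) : L.foldl max a ∈ a :: L := by
  induction L generalizing a with
  | nil => simp
  | cons x t ih =>
    simp only [List.foldl]
    rcases List.mem_cons.mp (ih (max a x)) with h | h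
    · rcases max_choice a x with hc | hc <;> rw [h, hc] <;> simp
    · simp [h]

-- the last element of a (· ≤ ·)-pairwise list bounds every member
lemma getLast_ge_of_pairwise {L : List Int} (hp : L.Pairwise (· ≤ ·)) (h : L ≠ []) :
    ∀ y ∈ L, y ≤ L.getLast h := by
  induction L with
  | nil => simp at h
  | cons x t ih =>
    intro y hy
    cases t with
    | nil => simp at hy; simp [hy]
    | cons z s =>
      rcases List.mem_cons.mp hy with rfl | hy'
      · have hx : y ≤ z := (List.pairwise_cons.mp hp).1 z (by simp)
        have := ih (List.pairwise_cons.mp hp).2 (by simp) z (by simp)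
        rw [List.getLast_cons (by simp)]
        exact le_trans hx this
      · rw [List.getLast_cons (by simp)]
        exact ih (List.pairwise_cons.mp hp).2 (by simp) y hy'

-- ===== VERDICT (by name: the statement is the Claim_ definition above) =====
theorem min_max_nums_spec : Claim_equal_min_max_nums := by
  intro string _ hpre
  unfold Pre_min_max_nums at hpre
  unfold Spec_min_max_nums min_max_nums min_max_nums_alt
  set lst := PySem.Str.split₀ string with hlst
  obtain ⟨w0, t, hw⟩ := List.exists_cons_of_ne_nil hpre
  set L := lst.map PySem.Str.len with hL
  have hLne : L ≠ [] := by simp [hL, hw]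
  set S := PySem.List.sorted L (fun x => x) false with hS
  have hSperm : S.Perm L := PySem.List.sorted_perm L _ _
  have hSne : S ≠ [] := fun h => hLne ((h ▸ hSperm).symm.eq_nil)
  obtain ⟨s0, st, hs⟩ := List.exists_cons_of_ne_nil hSne
  -- A side
  simp only [hw, PySem.List.pyGet?_zero_cons]
  rw [foldA_min_max]
  -- B side: s[0] and s[-1]
  rw [PySem.List.pyGet?_neg_one, hs]
  simp only [PySem.List.pyGet?_zero_cons]
  rw [List.getLast?_eq_some_getLast (by simp)]
  have hmem_iff : ∀ y : Int, y ∈ S ↔ y ∈ L := fun y => hSperm.mem_iff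
  have hpair : S.Pairwise (· ≤ ·) := by
    have := PySem.List.sorted_pairwise L (fun x : Int => x) (κ := Int)
    simpa [← hS] using this
  have hLw : L = PySem.Str.len w0 :: t.map PySem.Str.len := by simp [hL, hw]
  -- the fold values are the min / max of L
  have hmin_mem : L.foldl min (PySem.Str.len w0) ∈ L := by
    rw [hLw]
    have := foldl_min_mem (t.map PySem.Str.len) (min (PySem.Str.len w0) (PySem.Str.len w0))
    simp only [min_self] at this
    simp only [List.foldl, min_self]
    rcases List.mem_cons.mp this with h | h
    · rw [h]; simp
    · exact List.mem_cons_of_mem _ h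
  have hmin_le : ∀ y ∈ L, L.foldl min (PySem.Str.len w0) ≤ y := by
    intro y hy
    rw [hLw] at hy ⊢
    simp only [List.foldl, min_self]
    rcases List.mem_cons.mp hy with rfl | hy'
    · exact foldl_min_le _ _ _ (by simp)
    · exact foldl_min_le _ _ y (by simp [hy'])
  have hmax_mem : L.foldl max (PySem.Str.len w0) ∈ L := by
    rw [hLw]
    have := foldl_max_mem (t.map PySem.Str.len) (max (PySem.Str.len w0) (PySem.Str.len w0))
    simp only [max_self] at this
    simp only [List.foldl, max_self]
    rcases List.mem_cons.mp this with h | h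
    · rw [h]; simp
    · exact List.mem_cons_of_mem _ h
  have hmax_ge : ∀ y ∈ L, y ≤ L.foldl max (PySem.Str.len w0) := by
    intro y hy
    rw [hLw] at hy ⊢
    simp only [List.foldl, max_self]
    rcases List.mem_cons.mp hy with rfl | hy'
    · exact le_foldl_max _ _ _ (by simp)
    · exact le_foldl_max _ _ y (by simp [hy'])
  -- s0 is the min
  have hs0_mem : s0 ∈ L := (hmem_iff s0).mp (by simp [hs])
  have hs0_le : ∀ y ∈ L, s0 ≤ y :=
    fun y hy => PySem.List.key_head_sorted_le _ _ (hS.symm.trans hs) y hy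
  have hmin_eq : L.foldl min (PySem.Str.len w0) = s0 :=
    le_antisymm (hmin_le s0 hs0_mem) (hs0_le _ hmin_mem)
  -- the last sorted element is the max
  have hlast_mem : (s0 :: st).getLast (by simp) ∈ L := by
    apply (hmem_iff _).mp
    rw [hs]; exact List.getLast_mem _
  have hlast_ge : ∀ y ∈ L, y ≤ (s0 :: st).getLast (by simp) := by
    intro y hy
    have hyS : y ∈ s0 :: st := by rw [← hs]; exact (hmem_iff y).mpr hy
    exact getLast_ge_of_pairwise (hs ▸ hpair) (by simp) y hyS
  have hmax_eq : L.foldl max (PySem.Str.len w0) = (s0 :: st).getLast (by simp) :=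
    le_antisymm (hlast_ge _ hmax_mem) (hmax_ge _ hlast_mem)
  have e1 : List.map PySem.Str.len (w0 :: t) = L := by rw [hL, hw]
  rw [e1]
  exact congrArg₂ (fun a b => [a, b]) hmin_eq hmax_eq
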